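-- pv_equiv track=rewrite | github.com/ThomasSanna/atelier-de-programmation-L3STI | Atelier 2/Partie 2/Exercice 5/exo5.py | agenceObjetVitrines
-- ===== SOURCE A (Python) =====
-- def maxOccurence(lst:list)->int:
--   """
--   Retourne le nombre maximum d'occurrences d'un élément dans la liste lst.
--
--   Args:
--       lst (list): La liste des éléments.
--
--   Returns:
--     int: Le nombre maximum d'occurrences d'un élément dans la liste.
--   """
--   maxi = 0
--   for i in range(len(lst)):
--     # vérifie si L'élément courant a plus d'occurrences que le maximum actuel
--     if maxi < lst.count(lst[i]):
--       maxi = lst.count(lst[i])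
--   return maxi
--
-- def rangerParNombreOccurence(lst:list)->list:
--   """
--   Trie la liste lst par nombre d'occurrences décroissantes des éléments.
--
--   Args:
--       lst (list): La liste des éléments.
--
--   Returns:
--       list: La liste triée par nombre d'occurrences décroissantes.
--   """
--   lst.sort()
--   maxOcc = maxOccurence(lst)
--   # crée une liste de listes temporaires pour stocker les éléments par occurrences
--   lTemp = [[] for i in range(maxOcc)]
--   for elt in lst:
--     # ajoute L'élément dans la liste temporaire correspondante
--     lTemp[lst.count(elt)-1].append(elt)
--   lRes = []
--   for i in range(len(lTemp)):
--     # ajoute les éléments des listes temporaires à la liste de résultat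
--     lRes += lTemp[len(lTemp)-(i+1)]
--   return lRes
--
-- def agenceObjetVitrines(nbEmplacement:int, lObjets:list)->list:
--   """
--   Organise les objets dans les vitrines en fonction du nombre d'emplacements disponibles.
--
--   Args:
--       nbEmplacement (int): Le nombre d'emplacements disponibles par vitrine.
--       lObjets (list): La liste des objets à organiser.
--
--   Returns:
--       list: Une liste de deux vitrines contenant les objets organisés.
--   """
--   lParOccurence = rangerParNombreOccurence(lObjets)
--   vitrines = ([], [])
--   for i in range(len(vitrines)):
--     nbEmpPris = 0
--     j = 0
--     while j < len(lParOccurence) and nbEmpPris < nbEmplacement: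
--       # vérifie si L'objet n'est pas déjà dans la vitrine courante
--       if lParOccurence[j] not in vitrines[i]:
--         vitrines[i].append(lParOccurence[j])
--         lParOccurence.pop(j)
--         nbEmpPris += 1
--       else:
--         j += 1
--   # trie les objets par ordre croissant dans chaque vitrine
--   vitrines = map(sorted, vitrines)
--   # Renvoie les deux vitrines et renvoie si les objets ont bien tous été pris ou non.
--   return (list(vitrines), len(lParOccurence) == 0)
-- ===== SOURCE B (Python) =====
-- def agenceObjetVitrines(nbEmplacement, lObjets):
--     # Frequency-table selection instead of A's bucket sort + pop-based scan loops.
--     # Sorts lObjets in place, like A does.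
--     lObjets.sort()
--     counts = {}
--     for x in lObjets:
--         counts[x] = counts.get(x, 0) + 1
--     # keys are ascending (lObjets is sorted); stable sort by descending count
--     priority = sorted(counts, key=lambda v: -counts[v])
--     cap = nbEmplacement if nbEmplacement > 0 else 0
--     v0 = priority[:cap]
--     v1 = []
--     for v in priority:
--         if len(v1) >= cap:
--             break
--         if v not in v0 or counts[v] > 1:
--             v1.append(v)
--     return ([sorted(v0), sorted(v1)], len(v0) + len(v1) == len(lObjets))
-- ===== Notes on version B (the rewrite author's own statement) =====
-- stated objective: faster
-- what changed: B replaces A's count-per-element bucket sort and the two destructive pop-and-rescan while loops by one frequency table, one stable sort of the distinct values by descending count, and direct take/filter selection of the two vitrines.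
import Mathlib
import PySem

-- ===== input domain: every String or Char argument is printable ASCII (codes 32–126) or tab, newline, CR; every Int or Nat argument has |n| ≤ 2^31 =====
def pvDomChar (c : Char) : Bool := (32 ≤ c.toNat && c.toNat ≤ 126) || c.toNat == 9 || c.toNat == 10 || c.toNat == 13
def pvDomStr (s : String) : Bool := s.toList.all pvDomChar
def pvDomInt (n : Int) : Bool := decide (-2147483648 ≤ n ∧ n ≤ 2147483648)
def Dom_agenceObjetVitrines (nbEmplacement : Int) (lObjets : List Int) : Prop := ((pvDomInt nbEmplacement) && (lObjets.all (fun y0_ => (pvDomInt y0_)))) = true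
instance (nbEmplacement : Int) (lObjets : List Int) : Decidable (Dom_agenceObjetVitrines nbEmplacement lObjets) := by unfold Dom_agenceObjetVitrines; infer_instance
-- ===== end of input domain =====

-- B replaces A's quadratic count-bucket sort and pop-based scan loops by a frequency
-- table and a single stable sort of the distinct values (objective: faster).
-- Both A and B sort the caller's list in place; the theorems below are about the
-- RETURN value only (B performs the same mutation).

-- ===== PORT A =====
def maxOccurence (lst : List Int) : Int :=
  (PySem.List.pyRange 0 lst.length 1).foldl
    (fun maxi i =>
      if maxi < (PySem.List.count lst (PySem.List.pyGetD lst i 0) : Int)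
      then (PySem.List.count lst (PySem.List.pyGetD lst i 0) : Int) else maxi) 0

def rangerParNombreOccurence (lst : List Int) : List Int :=
  -- lst.sort()
  let s := PySem.List.sorted lst (fun x => x) false
  let maxOcc := maxOccurence s
  -- lTemp = [[] for i in range(maxOcc)]
  let lTemp : List (List Int) := (PySem.List.pyRange 0 maxOcc 1).map (fun _ => ([] : List Int))
  -- for elt in lst: lTemp[lst.count(elt)-1].append(elt)   (index always in range)
  let lTemp := s.foldl (fun lT elt =>
      PySem.List.pySetD lT ((PySem.List.count s elt : Int) - 1)
        (PySem.List.pyGetD lT ((PySem.List.count s elt : Int) - 1) [] ++ [elt])) lTemp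
  -- for i in range(len(lTemp)): lRes += lTemp[len(lTemp)-(i+1)]
  (PySem.List.pyRange 0 lTemp.length 1).foldl
    (fun lRes i => lRes ++ PySem.List.pyGetD lTemp ((lTemp.length : Int) - (i + 1)) []) []

-- the 'while j < len(lParOccurence) and nbEmpPris < nbEmplacement' loop of A
def fillWhile (nbEmplacement : Int) (lPar vit : List Int) (j : Nat) (nbEmpPris : Int) :
    List Int × List Int :=
  if h : j < lPar.length ∧ nbEmpPris < nbEmplacement then
    if PySem.List.pyGetD lPar (j : Int) 0 ∉ vit then
      -- vitrines[i].append(lParOccurence[j]); lParOccurence.pop(j); nbEmpPris += 1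
      fillWhile nbEmplacement (lPar.eraseIdx j) (vit ++ [PySem.List.pyGetD lPar (j : Int) 0]) j
        (nbEmpPris + 1)
    else
      fillWhile nbEmplacement lPar vit (j + 1) nbEmpPris
  else (vit, lPar)
termination_by lPar.length - j
decreasing_by
  · have := h.1; have : (lPar.eraseIdx j).length = lPar.length - 1 := by
      exact List.length_eraseIdx_of_lt h.1
    omega
  · omega

def agenceObjetVitrines (nbEmplacement : Int) (lObjets : List Int) : List (List Int) × Bool :=
  let lParOccurence := rangerParNombreOccurence lObjets
  -- for i in range(len(vitrines)) : two iterations of the while loop, unrolled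
  let r0 := fillWhile nbEmplacement lParOccurence [] 0 0
  let r1 := fillWhile nbEmplacement r0.2 [] 0 0
  ([PySem.List.sorted r0.1 (fun x => x) false, PySem.List.sorted r1.1 (fun x => x) false],
   decide ((r1.2.length : Int) = 0))

-- ===== PORT B =====
-- for v in priority: if len(v1) >= cap: break; if v not in v0 or counts[v] > 1: v1.append(v)
def altTakeV1 (cap : Int) (counts : PySem.Dict Int Int) (v0 : List Int) :
    List Int → List Int → List Int
  | [], acc => acc
  | v :: rest, acc =>
    if (acc.length : Int) ≥ cap then acc
    else if v ∉ v0 ∨ counts.getD v 0 > 1 then altTakeV1 cap counts v0 rest (acc ++ [v])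
    else altTakeV1 cap counts v0 rest acc

def agenceObjetVitrines_alt (nbEmplacement : Int) (lObjets : List Int) : List (List Int) × Bool :=
  let s := PySem.List.sorted lObjets (fun x => x) false
  let counts : PySem.Dict Int Int := s.foldl (fun d x => d.insert x (d.getD x 0 + 1)) PySem.Dict.empty
  let priority := PySem.List.sorted counts.keys (fun v => -(counts.getD v 0)) false
  let cap : Int := if nbEmplacement > 0 then nbEmplacement else 0
  let v0 := PySem.List.slice priority none (some cap)
  let v1 := altTakeV1 cap counts v0 priority []
  ([PySem.List.sorted v0 (fun x => x) false, PySem.List.sorted v1 (fun x => x) false],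
   decide (v0.length + v1.length = s.length))

-- ===== PRECONDITION & SPEC =====
def Spec_agenceObjetVitrines (nbEmplacement : Int) (lObjets : List Int) (out : List (List Int) × Bool) : Prop := out = agenceObjetVitrines_alt nbEmplacement lObjets
instance (nbEmplacement : Int) (lObjets : List Int) (out : List (List Int) × Bool) : Decidable (Spec_agenceObjetVitrines nbEmplacement lObjets out) := by unfold Spec_agenceObjetVitrines; infer_instance

-- ===== CLAIM (what is proved, stated in full; the proofs are below) =====
def Claim_equal_agenceObjetVitrines : Prop := ∀ (nbEmplacement : Int) (lObjets : List Int), Dom_agenceObjetVitrines nbEmplacement lObjets → Spec_agenceObjetVitrines nbEmplacement lObjets (agenceObjetVitrines nbEmplacement lObjets)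

-- ===== LEMMAS AND PROOFS =====

-- proof-side abbreviations: the sorted input, its counts, and B's priority list
def pvS (l : List Int) : List Int := PySem.List.sorted l (fun x => x) false
def pvCnt (l : List Int) (v : Int) : Nat := List.count v (pvS l)
def pvP (l : List Int) : List Int :=
  PySem.List.sorted (PySem.Set.ofList (pvS l)) (fun v => -(pvCnt l v : Int)) false

-- 'grouped list': each value v of P contributes its cnt v occurrences, consecutively
def pvG (cnt : Int → Nat) (P : List Int) : List Int :=
  P.flatMap (fun v => List.replicate (cnt v) v)

-- A's while loop, reformulated structurally: pre = scanned prefix (kept), suf = rest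
def pvLoop2 (cap : Int) : List Int → List Int → List Int → Int → List Int × List Int
  | pre, [], vit, _ => (vit, pre)
  | pre, x :: rest, vit, nb =>
    if nb < cap then
      if x ∉ vit then pvLoop2 cap pre rest (vit ++ [x]) (nb + 1)
      else pvLoop2 cap (pre ++ [x]) rest vit nb
    else (vit, pre ++ x :: rest)

-- strict lexicographic order on (key v, v): the order of a stable sort by key
-- applied to a strictly increasing input
def pvLexLt (key : Int → Int) (a b : Int) : Prop :=
  key a < key b ∨ (key a = key b ∧ a < b)

theorem pvFlatMap_congr {α β : Type} (l : List α) (f g : α → List β)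
    (h : ∀ x ∈ l, f x = g x) : l.flatMap f = l.flatMap g := by
  induction l with
  | nil => rfl
  | cons x t ih =>
    simp only [List.flatMap_cons]
    rw [h x (by simp), ih (fun y hy => h y (by simp [hy]))]

theorem pvG_congr (c1 c2 : Int → Nat) (P : List Int) (h : ∀ v ∈ P, c1 v = c2 v) :
    pvG c1 P = pvG c2 P := by
  exact pvFlatMap_congr P _ _ (fun v hv => by rw [h v hv])

theorem pvG_filter (c : Int → Nat) (P : List Int) :
    pvG c P = pvG c (P.filter (fun v => decide (c v ≠ 0))) := by
  induction P with
  | nil => rfl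
  | cons v t ih =>
    simp only [pvG, List.flatMap_cons, List.filter_cons] at ih ⊢
    by_cases hv : c v = 0
    · simp [hv, ih]
    · simp [hv, ih]

theorem pvG_len_perm (c : Int → Nat) (P P' : List Int) (h : P.Perm P') :
    (pvG c P).length = (pvG c P').length := by
  simp only [pvG, List.length_flatMap]
  exact (h.map _).sum_eq

theorem fillWhile_eq (cap : Int) (lPar vit : List Int) (j : Nat) (nb : Int)
    (h : j ≤ lPar.length) :
    fillWhile cap lPar vit j nb = pvLoop2 cap (lPar.take j) (lPar.drop j) vit nb := by
  rw [fillWhile]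
  by_cases hj : j < lPar.length
  · have hdrop : lPar.drop j = lPar[j] :: lPar.drop (j + 1) := List.drop_eq_getElem_cons hj
    have hget : PySem.List.pyGetD lPar (j : Int) 0 = lPar[j] := by
      rw [PySem.List.pyGetD_of_nonneg lPar 0 (by positivity)]
      simp [List.getD_eq_getElem?_getD, List.getElem?_eq_getElem hj]
    rw [hdrop, hget]
    by_cases hnb : nb < cap
    · rw [dif_pos ⟨hj, hnb⟩]
      simp only [pvLoop2]
      rw [if_pos hnb]
      by_cases hmem : lPar[j] ∉ vit
      · rw [if_pos hmem, if_pos hmem]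
        have hlen := List.length_eraseIdx_of_lt hj
        rw [fillWhile_eq cap (lPar.eraseIdx j) (vit ++ [lPar[j]]) j (nb + 1) (by omega)]
        rw [List.eraseIdx_eq_take_drop_succ,
            List.take_append_of_le_length (by simp [List.length_take]; omega),
            List.drop_append_of_le_length (by simp [List.length_take]; omega)]
        simp [List.take_take]
      · rw [if_neg hmem, if_neg hmem]
        rw [fillWhile_eq cap lPar vit (j + 1) nb (by omega)]
        have ht : lPar.take (j + 1) = lPar.take j ++ [lPar[j]] := by
          rw [List.take_add_one, List.getElem?_eq_getElem hj]; rfl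
        rw [ht]
    · rw [dif_neg (by tauto)]
      simp only [pvLoop2]
      rw [if_neg hnb, ← hdrop, List.take_append_drop]
  · have hj' : j = lPar.length := by omega
    rw [dif_neg (by omega)]
    simp [hj', pvLoop2, List.drop_length]
termination_by lPar.length - j
decreasing_by
  · have := List.length_eraseIdx_of_lt hj; omega
  · omega

theorem pvLoop2_len (cap : Int) (suf : List Int) : ∀ (pre vit : List Int) (nb : Int),
    (pvLoop2 cap pre suf vit nb).1.length + (pvLoop2 cap pre suf vit nb).2.length
      = vit.length + pre.length + suf.length := by
  induction suf with
  | nil => intro pre vit nb; simp [pvLoop2]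
  | cons x rest ih =>
    intro pre vit nb
    simp only [pvLoop2]
    by_cases hnb : nb < cap
    · by_cases hx : x ∈ vit
      · simp only [if_pos hnb, hx, not_true_eq_false, ite_false]
        have := ih (pre ++ [x]) vit nb
        simp at this ⊢; omega
      · simp only [if_pos hnb, hx, not_false_eq_true, ite_true]
        have := ih pre (vit ++ [x]) (nb + 1)
        simp at this ⊢; omega
    · simp only [if_neg hnb]
      simp; omega

theorem pvLoop2_skip (cap : Int) (v : Int) (m : Nat) : ∀ (pre suf vit : List Int) (nb : Int),
    v ∈ vit →
    pvLoop2 cap pre (List.replicate m v ++ suf) vit nb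
      = pvLoop2 cap (pre ++ List.replicate m v) suf vit nb := by
  induction m with
  | zero => intro pre suf vit nb hv; simp
  | succ m ih =>
    intro pre suf vit nb hv
    have : List.replicate (m + 1) v ++ suf = v :: (List.replicate m v ++ suf) := by
      simp [List.replicate_succ]
    rw [this, pvLoop2]
    by_cases hnb : nb < cap
    · simp only [if_pos hnb, hv, not_true_eq_false, ite_false]
      rw [ih (pre ++ [v]) suf vit nb hv]
      congr 1
      simp [List.replicate_succ]
    · simp only [if_neg hnb]
      cases suf with
      | nil =>
        simp [pvLoop2, List.replicate_succ]
      | cons y t =>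
        simp [pvLoop2, if_neg hnb, List.replicate_succ]

theorem pvLoop2_main (cap : Int) (cnt : Int → Nat) (P : List Int) :
    ∀ (pre vit : List Int) (nb : Int), P.Nodup → (∀ v ∈ P, 1 ≤ cnt v) →
    (∀ v ∈ P, v ∉ vit) →
    pvLoop2 cap pre (pvG cnt P) vit nb =
      (vit ++ P.take (cap - nb).toNat,
       pre ++ pvG (fun v => if v ∈ P.take (cap - nb).toNat then cnt v - 1 else cnt v) P) := by
  induction P with
  | nil =>
    intro pre vit nb _ _ _
    simp [pvG, pvLoop2]
  | cons v P' ih =>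
    intro pre vit nb hnd h1 hdisj
    have hvP : v ∈ v :: P' := by simp
    have hc1 : 1 ≤ cnt v := h1 v hvP
    have hrep : pvG cnt (v :: P') = v :: (List.replicate (cnt v - 1) v ++ pvG cnt P') := by
      simp only [pvG, List.flatMap_cons]
      rw [show cnt v = (cnt v - 1) + 1 by omega, List.replicate_succ]
      simp
    by_cases hnb : nb < cap
    · have hvnot : v ∉ vit := hdisj v hvP
      rw [hrep, pvLoop2]
      simp only [if_pos hnb, hvnot, not_false_eq_true, ite_true]
      rw [pvLoop2_skip cap v (cnt v - 1) pre (pvG cnt P') (vit ++ [v]) (nb + 1) (by simp)]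
      have hnd' : P'.Nodup := (List.nodup_cons.mp hnd).2
      have hvP' : v ∉ P' := (List.nodup_cons.mp hnd).1
      rw [ih (pre ++ List.replicate (cnt v - 1) v) (vit ++ [v]) (nb + 1) hnd'
            (fun w hw => h1 w (by simp [hw]))
            (fun w hw => by
              intro hmem
              rcases List.mem_append.mp hmem with h | h
              · exact hdisj w (by simp [hw]) h
              · exact hvP' ((List.mem_singleton.mp h) ▸ hw))]
      have htn : (cap - nb).toNat = (cap - (nb + 1)).toNat + 1 := by omega
      have htake : (v :: P').take ((cap - nb).toNat)
          = v :: P'.take ((cap - (nb + 1)).toNat) := by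
        rw [htn]; rfl
      rw [Prod.mk.injEq]
      constructor
      · rw [htake]; simp
      · rw [htake]
        have hg : pvG (fun w => if w ∈ v :: P'.take ((cap - (nb + 1)).toNat)
              then cnt w - 1 else cnt w) (v :: P')
            = List.replicate (cnt v - 1) v
              ++ pvG (fun w => if w ∈ P'.take ((cap - (nb + 1)).toNat)
                  then cnt w - 1 else cnt w) P' := by
          simp only [pvG, List.flatMap_cons]
          congr 1
          · simp
          · apply pvFlatMap_congr
            intro w hw
            have hwv : w ≠ v := fun he => hvP' (he ▸ hw)
            simp [hwv]
        rw [hg]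
        simp
    · rw [hrep, pvLoop2]
      simp only [if_neg hnb]
      have ht0 : (cap - nb).toNat = 0 := by omega
      rw [Prod.mk.injEq]
      constructor
      · rw [ht0]; simp
      · rw [← hrep]
        have h2 : pvG (fun w => if w ∈ (v :: P').take ((cap - nb).toNat) then cnt w - 1 else cnt w)
              (v :: P') = pvG cnt (v :: P') := by
          apply pvG_congr
          intro w _
          rw [ht0]
          simp
        rw [h2]
theorem pvInsertBy_lex (key : Int → Int) (x : Int) (acc : List Int)
    (hacc : acc.Pairwise (pvLexLt key)) (hlt : ∀ a ∈ acc, a < x) :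
    (PySem.List.insertBy (fun a b => decide (key a < key b)) x acc).Pairwise (pvLexLt key) := by
  induction acc with
  | nil => simp [PySem.List.insertBy]
  | cons y ys ih =>
    simp only [PySem.List.insertBy]
    by_cases hk : key x < key y
    · rw [if_pos (by simpa using hk)]
      constructor
      · intro b hb
        rcases List.mem_cons.mp hb with hb | hb
        · exact Or.inl (hb ▸ hk)
        · have : pvLexLt key y b := (List.pairwise_cons.mp hacc).1 b hb
          have : key y ≤ key b := by rcases this with h | h; omega; omega
          exact Or.inl (by omega)
      · exact hacc
    · rw [if_neg (by simpa using hk)]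
      constructor
      · intro b hb
        rcases (PySem.List.mem_insertBy _ x b ys).mp hb with rfl | hb
        · have hyx : y < b := hlt y (by simp)
          have : key y ≤ key b := by omega
          rcases lt_or_eq_of_le this with h | h
          · exact Or.inl h
          · exact Or.inr ⟨h, hyx⟩
        · exact (List.pairwise_cons.mp hacc).1 b hb
      · exact ih (List.pairwise_cons.mp hacc).2 (fun a ha => hlt a (by simp [ha]))


theorem pvFoldlInsert_lex (key : Int → Int) (xs : List Int) :
    ∀ acc : List Int, xs.Pairwise (· < ·) → acc.Pairwise (pvLexLt key) →
    (∀ a ∈ acc, ∀ y ∈ xs, a < y) →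
    (xs.foldl (fun acc x => PySem.List.insertBy (fun a b => decide (key a < key b)) x acc)
        acc).Pairwise (pvLexLt key) := by
  induction xs with
  | nil => intro acc _ hacc _; simpa using hacc
  | cons x xs' ih =>
    intro acc hxs hacc hcross
    simp only [List.foldl_cons]
    apply ih _ (List.pairwise_cons.mp hxs).2
    · exact pvInsertBy_lex key x acc hacc (fun a ha => hcross a ha x (by simp))
    · intro a ha y hy
      rcases (PySem.List.mem_insertBy _ x a acc).mp ha with ha | ha
      · exact ha ▸ (List.pairwise_cons.mp hxs).1 y hy
      · exact hcross a ha y (by simp [hy])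

theorem pvSorted_lex (key : Int → Int) (xs : List Int) (h : xs.Pairwise (· < ·)) :
    (PySem.List.sorted xs key false).Pairwise (pvLexLt key) := by
  rw [PySem.List.sorted_eq_foldl_insertBy]
  exact pvFoldlInsert_lex key xs [] h (by simp) (by simp)


theorem pvFoldlAdd_sublist (l : List Int) : ∀ acc : List Int,
    (l.foldl PySem.Set.add acc).Sublist (acc ++ l) := by
  induction l with
  | nil => intro acc; simp
  | cons x t ih =>
    intro acc
    simp only [List.foldl_cons]
    have h1 : (t.foldl PySem.Set.add (PySem.Set.add acc x)).Sublist (PySem.Set.add acc x ++ t) :=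
      ih _
    have h2 : (PySem.Set.add acc x).Sublist (acc ++ [x]) := by
      unfold PySem.Set.add
      split
      · exact List.sublist_append_left _ _
      · exact List.Sublist.refl _
    have h3 : (PySem.Set.add acc x ++ t).Sublist ((acc ++ [x]) ++ t) := h2.append_right t
    have h4 := h1.trans h3
    simpa using h4


theorem pvOfList_pairwise_lt (s : List Int) (hs : s.Pairwise (· ≤ ·)) :
    (PySem.Set.ofList s).Pairwise (· < ·) := by
  have hsub : (PySem.Set.ofList s).Sublist s := by
    rw [PySem.Set.ofList_eq_foldl]
    simpa using pvFoldlAdd_sublist s []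
  have h1 : (PySem.Set.ofList s).Pairwise (· ≤ ·) := hs.sublist hsub
  have h2 : (PySem.Set.ofList s).Pairwise (· ≠ ·) := PySem.Set.nodup_ofList s
  exact (h1.and h2).imp (fun h => lt_of_le_of_ne h.1 h.2)


theorem pvSorted_split_min (t : List Int) (v : Int) (ht : t.Pairwise (· ≤ ·))
    (hv : ∀ x ∈ t, v ≤ x) :
    t = List.replicate (List.count v t) v ++ t.filter (fun x => decide (x ≠ v)) := by
  induction t with
  | nil => simp
  | cons x r ih =>
    have hx : ∀ y ∈ r, x ≤ y := (List.pairwise_cons.mp ht).1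
    have hr : r.Pairwise (· ≤ ·) := (List.pairwise_cons.mp ht).2
    by_cases hxv : x = v
    · subst hxv
      have hfil : (x :: r).filter (fun y => decide (y ≠ x)) = r.filter (fun y => decide (y ≠ x)) := by
        rw [List.filter_cons]; simp
      rw [List.count_cons_self, List.replicate_succ, hfil, List.cons_append]
      exact congrArg (x :: ·) (ih hr hx)
    · have hvx : v < x := lt_of_le_of_ne (hv x (by simp)) (fun h => hxv h.symm)
      have hnot : v ∉ x :: r := by
        intro hmem
        rcases List.mem_cons.mp hmem with h | h
        · exact hxv h.symm
        · exact absurd (hx v h) (by omega)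
      have hfil : (x :: r).filter (fun y => decide (y ≠ v)) = x :: r := by
        apply List.filter_eq_self.mpr
        intro y hy
        rcases List.mem_cons.mp hy with h | h
        · simp [h, hxv]
        · have := hx y h
          simp only [decide_eq_true_eq]
          omega
      rw [List.count_eq_zero_of_not_mem hnot, hfil]
      rfl


theorem pvGrouped (Q : List Int) : ∀ (t : List Int), Q.Pairwise (· < ·) →
    t.Pairwise (· ≤ ·) → (∀ x, x ∈ Q ↔ x ∈ t) →
    t = Q.flatMap (fun v => List.replicate (List.count v t) v) := by
  induction Q with
  | nil =>
    intro t _ _ h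
    simp only [List.flatMap_nil]
    exact List.eq_nil_iff_forall_not_mem.mpr (fun x hx => by simpa using (h x).mpr hx)
  | cons v Q' ih =>
    intro t hQ ht h
    have hvQ : ∀ w ∈ Q', v < w := (List.pairwise_cons.mp hQ).1
    have hQ' : Q'.Pairwise (· < ·) := (List.pairwise_cons.mp hQ).2
    have hmin : ∀ x ∈ t, v ≤ x := by
      intro x hx
      rcases List.mem_cons.mp ((h x).mpr hx) with rfl | hxQ
      · exact le_refl _
      · exact le_of_lt (hvQ x hxQ)
    have hsplit := pvSorted_split_min t v ht hmin
    set t' := t.filter (fun x => decide (x ≠ v)) with ht'def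
    have ht' : t'.Pairwise (· ≤ ·) := ht.sublist List.filter_sublist
    have hmem' : ∀ x, x ∈ Q' ↔ x ∈ t' := by
      intro x
      constructor
      · intro hx
        have hxv : x ≠ v := by have := hvQ x hx; omega
        have : x ∈ t := (h x).mp (by simp [hx])
        simp [ht'def, List.mem_filter, this, hxv]
      · intro hx
        rw [ht'def, List.mem_filter] at hx
        have hxv : x ≠ v := by simpa using hx.2
        rcases List.mem_cons.mp ((h x).mpr hx.1) with rfl | hxQ
        · exact absurd rfl hxv
        · exact hxQ
    have hrec := ih t' hQ' ht' hmem'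
    have hcnt : ∀ w ∈ Q', List.count w t' = List.count w t := by
      intro w hw
      have hwv : w ≠ v := by have := hvQ w hw; omega
      rw [ht'def]
      exact List.count_filter (by simpa using hwv)
    rw [List.flatMap_cons]
    nth_rewrite 1 [hsplit]
    congr 1
    rw [hrec]
    apply pvFlatMap_congr
    intro w hw
    rw [hcnt w hw]


theorem pvCountsGetD (l : List Int) : ∀ (d : PySem.Dict Int Int) (v : Int),
    (l.foldl (fun d x => d.insert x (d.getD x 0 + 1)) d).getD v 0
      = d.getD v 0 + List.count v l := by
  induction l with
  | nil => intro d v; simp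
  | cons x t ih =>
    intro d v
    simp only [List.foldl_cons]
    rw [ih]
    rw [PySem.Dict.getD_insert]
    by_cases hvx : v = x
    · subst hvx
      rw [if_pos rfl, List.count_cons_self]
      push_cast; ring
    · rw [if_neg hvx, List.count_cons_of_ne (by exact fun h => hvx (by simpa using h.symm))]


theorem pvAltTake_eq (cap : Int) (counts : PySem.Dict Int Int) (v0 : List Int)
    (pr : List Int) : ∀ acc : List Int,
    altTakeV1 cap counts v0 pr acc
      = acc ++ (pr.filter (fun v => decide (v ∉ v0 ∨ counts.getD v 0 > 1))).take
          ((cap - acc.length).toNat) := by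
  induction pr with
  | nil => intro acc; simp [altTakeV1]
  | cons v rest ih =>
    intro acc
    simp only [altTakeV1]
    by_cases hfull : (acc.length : Int) ≥ cap
    · rw [if_pos hfull]
      have : (cap - (acc.length : Int)).toNat = 0 := by omega
      rw [this, List.take_zero, List.append_nil]
    · rw [if_neg hfull]
      have hsucc : (cap - (acc.length : Int)).toNat
          = (cap - ((acc.length : Int) + 1)).toNat + 1 := by omega
      rw [List.filter_cons]
      by_cases hp : v ∉ v0 ∨ counts.getD v 0 > 1
      · rw [if_pos hp, ih (acc ++ [v])]
        simp only [decide_eq_true_eq]  -- dummy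
        rw [if_pos (by simpa using hp)]
        simp only [List.length_append, List.length_cons, List.length_nil]
        rw [hsucc]
        simp [List.take_succ_cons]
      · rw [if_neg hp, ih acc]
        rw [if_neg (by simpa using hp)]


theorem pvBucket_len (idx : Int → Int) (l : List Int) : ∀ (T : List (List Int)),
    (l.foldl (fun t e =>
        PySem.List.pySetD t (idx e) (PySem.List.pyGetD t (idx e) [] ++ [e])) T).length
      = T.length := by
  induction l with
  | nil => intro T; rfl
  | cons e t ih =>
    intro T
    simp only [List.foldl_cons]
    rw [ih, PySem.List.length_pySetD]


theorem pvBucket_fold (idx : Int → Int) (l : List Int) : ∀ (T : List (List Int)),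
    (∀ e ∈ l, 0 ≤ idx e ∧ idx e < (T.length : Int)) → ∀ b : Nat,
    PySem.List.pyGetD
        (l.foldl (fun t e =>
          PySem.List.pySetD t (idx e) (PySem.List.pyGetD t (idx e) [] ++ [e])) T)
        (b : Int) []
      = PySem.List.pyGetD T (b : Int) [] ++ l.filter (fun e => decide (idx e = (b : Int))) := by
  induction l with
  | nil => intro T _ b; simp
  | cons e t ih =>
    intro T hrange b
    have he := hrange e (by simp)
    have hn : idx e = ((idx e).toNat : Int) := by omega
    have hlt : (idx e).toNat < T.length := by omega
    simp only [List.foldl_cons]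
    set T' := PySem.List.pySetD T (idx e) (PySem.List.pyGetD T (idx e) [] ++ [e]) with hT'
    have hlen : T'.length = T.length := PySem.List.length_pySetD _ _ _
    rw [ih T' (fun e' he' => by rw [hlen]; exact hrange e' (by simp [he'])) b]
    have hget : PySem.List.pyGetD T' (b : Int) []
        = if b = (idx e).toNat then PySem.List.pyGetD T (idx e) [] ++ [e]
          else PySem.List.pyGetD T (b : Int) [] := by
      rw [hT', hn]
      exact PySem.List.pyGetD_pySetD_natCast T _ b _ _ hlt
    rw [hget, List.filter_cons]
    by_cases hb : idx e = (b : Int)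
    · rw [if_pos (by omega)]
      rw [if_pos (by simpa using hb)]
      rw [← hb]
      simp
    · rw [if_neg (by omega)]
      rw [if_neg (by simpa using hb)]


theorem pvPartition (C : List Nat) (f : Int → Nat) (hC : C.Pairwise (· > ·)) :
    ∀ Q : List Int, Q.Pairwise (fun a b => f b ≤ f a) → (∀ v ∈ Q, f v ∈ C) →
    C.flatMap (fun c => Q.filter (fun v => decide (f v = c))) = Q := by
  intro Q
  induction Q with
  | nil =>
    intro _ _
    apply List.eq_nil_iff_forall_not_mem.mpr
    intro x hx
    rcases List.mem_flatMap.mp hx with ⟨c, _, hx⟩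
    simp at hx
  | cons v Q' ih =>
    intro hQ hmem
    have hvC : f v ∈ C := hmem v (by simp)
    have hle : ∀ w ∈ Q', f w ≤ f v := (List.pairwise_cons.mp hQ).1
    have hQ' : Q'.Pairwise (fun a b => f b ≤ f a) := (List.pairwise_cons.mp hQ).2
    rcases List.append_of_mem hvC with ⟨C1, C2, rfl⟩
    have hpw := hC
    rw [List.pairwise_append] at hpw
    have hC1 : ∀ c ∈ C1, f v < c := by
      intro c hc
      exact hpw.2.2 c hc (f v) (by simp)
    have hC2 : ∀ c ∈ C2, c < f v := by
      have := (List.pairwise_cons.mp hpw.2.1).1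
      exact this
    have hrec := ih hQ' (fun w hw => hmem w (by simp [hw]))
    rw [List.flatMap_append, List.flatMap_cons] at hrec ⊢
    have hemp1 : ∀ c ∈ C1, (v :: Q').filter (fun w => decide (f w = c)) = [] := by
      intro c hc
      apply List.filter_eq_nil_iff.mpr
      intro w hw
      rcases List.mem_cons.mp hw with rfl | hw
      · have := hC1 c hc; simp; omega
      · have := hC1 c hc; have := hle w hw; simp; omega
    have hemp1' : ∀ c ∈ C1, Q'.filter (fun w => decide (f w = c)) = [] := by
      intro c hc
      apply List.filter_eq_nil_iff.mpr
      intro w hw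
      have := hC1 c hc; have := hle w hw; simp; omega
    have hflat1 : C1.flatMap (fun c => (v :: Q').filter (fun w => decide (f w = c))) = [] := by
      apply List.flatMap_eq_nil_iff.mpr
      intro c hc; exact hemp1 c hc
    have hflat1' : C1.flatMap (fun c => Q'.filter (fun w => decide (f w = c))) = [] := by
      apply List.flatMap_eq_nil_iff.mpr
      intro c hc; exact hemp1' c hc
    have hslot : (v :: Q').filter (fun w => decide (f w = f v))
        = v :: Q'.filter (fun w => decide (f w = f v)) := by
      rw [List.filter_cons, if_pos (by simp)]
    have hflat2 : C2.flatMap (fun c => (v :: Q').filter (fun w => decide (f w = c)))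
        = C2.flatMap (fun c => Q'.filter (fun w => decide (f w = c))) := by
      apply pvFlatMap_congr
      intro c hc
      rw [List.filter_cons, if_neg (by have := hC2 c hc; simp; omega)]
    rw [hflat1, hflat2, hslot]
    rw [hflat1'] at hrec
    simp only [List.nil_append] at hrec ⊢
    rw [List.cons_append, hrec]


theorem pvMaxOcc (t : List Int) :
    0 ≤ maxOccurence t ∧ ∀ e ∈ t, (List.count e t : Int) ≤ maxOccurence t := by
  unfold maxOccurence
  rw [PySem.List.foldl_pyRange_zero_pyGetD' t 0
        (fun maxi e => if maxi < (PySem.List.count t e : Int)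
          then (PySem.List.count t e : Int) else maxi) 0]
  have hcongr : List.foldl (fun maxi e => if maxi < (PySem.List.count t e : Int)
          then (PySem.List.count t e : Int) else maxi) 0 t
      = List.foldl (fun acc e => max acc ((List.count e t : Int))) 0 t := by
    apply PySem.List.foldl_congr_mem
    intro acc x _
    rw [PySem.List.count_eq]
    rcases max_cases acc ((List.count x t : Int)) with ⟨h1, h2⟩ | ⟨h1, h2⟩ <;>
      split_ifs <;> omega
  rw [hcongr]
  have h := PySem.List.le_foldl_max_int t (fun e => (List.count e t : Int)) 0
  exact ⟨h.1, h.2⟩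


theorem pvP_spec (l : List Int) :
    (pvP l).Nodup ∧ (∀ v, v ∈ pvP l ↔ v ∈ pvS l) ∧ (pvP l).Pairwise (pvLexLt (fun v => -(pvCnt l v : Int))) := by
  have hs : (pvS l).Pairwise (· ≤ ·) := by
    have := PySem.List.sorted_pairwise l (fun x => x)
    simpa [pvS] using this
  have hK : (PySem.Set.ofList (pvS l)).Pairwise (· < ·) := pvOfList_pairwise_lt _ hs
  refine ⟨?_, ?_, ?_⟩
  · exact (PySem.List.sorted_perm _ _ _).nodup_iff.mpr (PySem.Set.nodup_ofList _)
  · intro v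
    rw [pvP, PySem.List.mem_sorted, PySem.Set.mem_ofList]
  · exact pvSorted_lex _ _ hK

theorem pvStepA (l : List Int) (c : Nat) :
    (pvS l).filter (fun e => decide (List.count e (pvS l) = c))
      = ((pvP l).filter (fun v => decide (List.count v (pvS l) = c))).flatMap
          (fun v => List.replicate (List.count v (pvS l)) v) := by
  have hs : (pvS l).Pairwise (· ≤ ·) := by
    have := PySem.List.sorted_pairwise l (fun x => x)
    simpa [pvS] using this
  obtain ⟨hnd, hmem, hlex⟩ := pvP_spec l
  set s := pvS l with hsdef
  set Q := (pvP l).filter (fun v => decide (List.count v s = c)) with hQdef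
  set t := s.filter (fun e => decide (List.count e s = c)) with htdef
  have hQlt : Q.Pairwise (· < ·) := by
    have h1 : Q.Pairwise (pvLexLt (fun v => -(pvCnt l v : Int))) :=
      hlex.sublist (List.filter_sublist)
    apply h1.imp_of_mem
    intro a b ha hb hab
    have hca : List.count a s = c := by
      have := (List.mem_filter.mp ha).2; simpa using this
    have hcb : List.count b s = c := by
      have := (List.mem_filter.mp hb).2; simpa using this
    rcases hab with h | h
    · exfalso
      simp only [pvCnt] at h
      rw [← hsdef] at h
      omega
    · exact h.2
  have ht : t.Pairwise (· ≤ ·) := hs.sublist List.filter_sublist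
  have hmem' : ∀ x, x ∈ Q ↔ x ∈ t := by
    intro x
    rw [hQdef, htdef, List.mem_filter, List.mem_filter, hmem x]
  have hg := pvGrouped Q t hQlt ht hmem'
  nth_rewrite 1 [hg]
  apply pvFlatMap_congr
  intro v hv
  have hc : List.count v s = c := by
    have := (List.mem_filter.mp hv).2; simpa using this
  rw [htdef, List.count_filter (by simpa using hc)]

theorem pvRanger_eq (l : List Int) :
    rangerParNombreOccurence l = pvG (pvCnt l) (pvP l) := by
  simp only [rangerParNombreOccurence]
  obtain ⟨hnd, hmemP, hlex⟩ := pvP_spec l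
  set s := PySem.List.sorted l (fun x => x) false with hsdef
  have hS : pvS l = s := by rw [hsdef]; rfl
  rw [hS] at hmemP
  have hmax := pvMaxOcc s
  set n := (maxOccurence s).toNat with hndef
  have hcnt1 : ∀ e ∈ s, 1 ≤ List.count e s := fun e he => List.count_pos_iff.mpr he
  have hcntM : ∀ e ∈ s, List.count e s ≤ n := fun e he => by
    have := hmax.2 e he; omega
  have hT0 : (PySem.List.pyRange 0 (maxOccurence s) 1).map (fun _ => ([] : List Int))
      = List.replicate n [] := by
    rw [List.eq_replicate_iff]
    refine ⟨?_, fun b hb => ?_⟩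
    · rw [List.length_map, PySem.List.length_pyRange_one]; omega
    · rcases List.mem_map.mp hb with ⟨_, _, rfl⟩; rfl
  rw [hT0]
  have hrange : ∀ e ∈ s, 0 ≤ ((PySem.List.count s e : Int) - 1)
      ∧ ((PySem.List.count s e : Int) - 1) < ((List.replicate n ([] : List Int)).length : Int) := by
    intro e he
    rw [PySem.List.count_eq, List.length_replicate]
    have h1 := hcnt1 e he
    have h2 := hcntM e he
    constructor <;> omega
  set TF := s.foldl (fun lT elt =>
      PySem.List.pySetD lT ((PySem.List.count s elt : Int) - 1)
        (PySem.List.pyGetD lT ((PySem.List.count s elt : Int) - 1) [] ++ [elt]))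
      (List.replicate n []) with hTF
  have hTlen : TF.length = n := by
    have h := pvBucket_len (fun e => (PySem.List.count s e : Int) - 1) s (List.replicate n [])
    beta_reduce at h
    rw [hTF, h, List.length_replicate]
  have hget0 : ∀ b : Nat, PySem.List.pyGetD (List.replicate n ([] : List Int)) (b : Int) [] = [] := by
    intro b
    rw [PySem.List.pyGetD_of_nonneg (List.replicate n []) [] (by positivity)]
    simp only [Int.toNat_natCast, List.getD_eq_getElem?_getD, List.getElem?_replicate]
    split <;> rfl
  have hbucket : ∀ b : Nat, PySem.List.pyGetD TF (b : Int) []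
      = s.filter (fun e => decide ((PySem.List.count s e : Int) - 1 = (b : Int))) := by
    intro b
    have h := pvBucket_fold (fun e => (PySem.List.count s e : Int) - 1) s (List.replicate n [])
      hrange b
    beta_reduce at h
    rw [hTF, h, hget0 b, List.nil_append]
  rw [PySem.List.foldl_append_eq_flatMap]
  rw [List.nil_append, hTlen, PySem.List.pyRange_one 0 (n : Int), List.flatMap_map]
  have hrng : ((n : Int) - 0).toNat = n := by omega
  rw [hrng]
  have hstep : ∀ k ∈ List.range n, PySem.List.pyGetD TF ((n : Int) - ((0 + (k : Int)) + 1)) []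
      = ((pvP l).filter (fun v => decide (List.count v s = n - k))).flatMap
          (fun v => List.replicate (List.count v s) v) := by
    intro k hk
    have hkn : k < n := List.mem_range.mp hk
    have hcast : (n : Int) - ((0 + (k : Int)) + 1) = ((n - 1 - k : Nat) : Int) := by
      omega
    rw [hcast, hbucket (n - 1 - k)]
    have hfc : s.filter (fun e => decide ((PySem.List.count s e : Int) - 1 = ((n - 1 - k : Nat) : Int)))
        = s.filter (fun e => decide (List.count e s = n - k)) := by
      apply List.filter_congr
      intro e he
      rw [decide_eq_decide, PySem.List.count_eq]
      have h1 := hcnt1 e he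
      constructor <;> intro h <;> omega
    rw [hfc]
    have hA := pvStepA l (n - k)
    rw [hS] at hA
    exact hA
  rw [pvFlatMap_congr _ _ _ hstep]
  rw [← List.flatMap_assoc]
  have hpart : (List.range n).flatMap
        (fun k => (pvP l).filter (fun v => decide (List.count v s = n - k))) = pvP l := by
    have hC : ((List.range n).map (fun j => n - j)).Pairwise (· > ·) := by
      rw [List.pairwise_map]
      apply List.pairwise_lt_range.imp_of_mem
      intro a b ha hb hab
      have : b < n := List.mem_range.mp hb
      omega
    have hQpw : (pvP l).Pairwise (fun a b => List.count b s ≤ List.count a s) := by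
      apply hlex.imp
      intro a b hab
      rcases hab with h | h
      · simp only [pvCnt, hS] at h; omega
      · simp only [pvCnt, hS] at h; omega
    have hmemC : ∀ v ∈ pvP l, List.count v s ∈ (List.range n).map (fun j => n - j) := by
      intro v hv
      have hvs : v ∈ s := (hmemP v).mp hv
      have h1 := hcnt1 v hvs
      have h2 := hcntM v hvs
      rw [List.mem_map]
      exact ⟨n - List.count v s, List.mem_range.mpr (by omega), by omega⟩
    have h := pvPartition ((List.range n).map (fun j => n - j)) (fun v => List.count v s)
      hC (pvP l) hQpw hmemC
    rw [List.flatMap_map] at h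
    exact h
  rw [hpart]
  rfl

theorem pvMainEq (nb : Int) (l : List Int) :
    agenceObjetVitrines nb l = agenceObjetVitrines_alt nb l := by
  simp only [agenceObjetVitrines, agenceObjetVitrines_alt]
  obtain ⟨hnd, hmemP, hlex⟩ := pvP_spec l
  set s := PySem.List.sorted l (fun x => x) false with hsdef
  have hS : pvS l = s := by rw [hsdef]; rfl
  rw [hS] at hmemP
  have hs : s.Pairwise (· ≤ ·) := by
    have := PySem.List.sorted_pairwise l (fun x => x)
    simpa using this
  rw [pvRanger_eq l]
  set counts := List.foldl (fun (d : PySem.Dict Int Int) x => d.insert x (d.getD x 0 + 1))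
      PySem.Dict.empty s with hcounts
  set cap : Int := if nb > 0 then nb else 0 with hcap
  have hgetD : ∀ v : Int, counts.getD v 0 = (pvCnt l v : Int) := by
    intro v
    rw [hcounts, pvCountsGetD]
    have h0 : (PySem.Dict.empty : PySem.Dict Int Int).getD v 0 = 0 := rfl
    rw [h0]
    simp only [pvCnt, hS]
    omega
  have hkeys : counts.keys = PySem.Set.ofList s := by
    rw [hcounts, PySem.Dict.keys_foldl_insert, PySem.Set.ofList_eq_foldl]
    rfl
  have hprio : PySem.List.sorted counts.keys (fun v => -(counts.getD v 0)) false = pvP l := by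
    rw [hkeys,
        show (fun v => -(counts.getD v 0)) = (fun v => -(pvCnt l v : Int)) from
          funext fun v => by rw [hgetD]]
    unfold pvP
    rw [hS]
  rw [hprio]
  have hcap0 : 0 ≤ cap := by rw [hcap]; split <;> omega
  have hcapN : cap.toNat = nb.toNat := by rw [hcap]; split <;> omega
  have hslice : PySem.List.slice (pvP l) none (some cap) = (pvP l).take nb.toNat := by
    rw [PySem.List.slice_to _ hcap0, hcapN]
  rw [hslice]
  have hc1 : ∀ v ∈ pvP l, 1 ≤ pvCnt l v := by
    intro v hv
    have : v ∈ s := (hmemP v).mp hv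
    simp only [pvCnt, hS]
    exact List.count_pos_iff.mpr this
  have hmain1 : pvLoop2 nb [] (pvG (pvCnt l) (pvP l)) [] 0
      = ((pvP l).take nb.toNat,
         pvG (fun v => if v ∈ (pvP l).take nb.toNat then pvCnt l v - 1 else pvCnt l v)
           (pvP l)) := by
    rw [pvLoop2_main nb (pvCnt l) (pvP l) [] [] 0 hnd hc1 (by simp)]
    simp only [List.nil_append]
    rw [Prod.mk.injEq]
    constructor
    · rw [show nb - 0 = nb from sub_zero nb]
    · exact pvG_congr _ _ _ (fun v _ => by rw [show nb - 0 = nb from sub_zero nb])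
  set cnt1 : Int → Nat :=
    fun v => if v ∈ (pvP l).take nb.toNat then pvCnt l v - 1 else pvCnt l v with hcnt1def
  have hfw1 : fillWhile nb (pvG (pvCnt l) (pvP l)) [] 0 0
      = ((pvP l).take nb.toNat, pvG cnt1 (pvP l)) := by
    rw [fillWhile_eq nb _ [] 0 0 (by omega)]
    simp only [List.take_zero, List.drop_zero]
    exact hmain1
  have hr01 : (fillWhile nb (pvG (pvCnt l) (pvP l)) [] 0 0).1 = (pvP l).take nb.toNat := by
    rw [hfw1]
  have hr02 : (fillWhile nb (pvG (pvCnt l) (pvP l)) [] 0 0).2 = pvG cnt1 (pvP l) := by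
    rw [hfw1]
  rw [hr02, hr01]
  -- second pass
  set P2 := (pvP l).filter (fun v => decide (cnt1 v ≠ 0)) with hP2def
  have hndP2 : P2.Nodup := hnd.filter _
  have hc1P2 : ∀ v ∈ P2, 1 ≤ cnt1 v := by
    intro v hv
    have := (List.mem_filter.mp hv).2
    simp only [decide_eq_true_eq] at this
    omega
  have hmain2 : pvLoop2 nb [] (pvG cnt1 P2) [] 0
      = (P2.take nb.toNat,
         pvG (fun v => if v ∈ P2.take nb.toNat then cnt1 v - 1 else cnt1 v) P2) := by
    rw [pvLoop2_main nb cnt1 P2 [] [] 0 hndP2 hc1P2 (by simp)]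
    simp only [List.nil_append]
    rw [Prod.mk.injEq]
    constructor
    · rw [show nb - 0 = nb from sub_zero nb]
    · exact pvG_congr _ _ _ (fun v _ => by rw [show nb - 0 = nb from sub_zero nb])
  set cnt2 : Int → Nat :=
    fun v => if v ∈ P2.take nb.toNat then cnt1 v - 1 else cnt1 v with hcnt2def
  have hfw2 : fillWhile nb (pvG cnt1 (pvP l)) [] 0 0 = (P2.take nb.toNat, pvG cnt2 P2) := by
    rw [pvG_filter cnt1 (pvP l), ← hP2def]
    rw [fillWhile_eq nb _ [] 0 0 (by omega)]
    simp only [List.take_zero, List.drop_zero]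
    exact hmain2
  have hr11 : (fillWhile nb (pvG cnt1 (pvP l)) [] 0 0).1 = P2.take nb.toNat := by rw [hfw2]
  have hr12 : (fillWhile nb (pvG cnt1 (pvP l)) [] 0 0).2 = pvG cnt2 P2 := by rw [hfw2]
  rw [hr11, hr12]
  -- B-side second vitrine
  have hv1 : altTakeV1 cap counts ((pvP l).take nb.toNat) (pvP l) []
      = ((pvP l).filter
          (fun v => decide (v ∉ (pvP l).take nb.toNat ∨ counts.getD v 0 > 1))).take
          nb.toNat := by
    rw [pvAltTake_eq]
    simp only [List.nil_append, List.length_nil, Nat.cast_zero, sub_zero]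
    rw [hcapN]
  rw [hv1]
  have hfiltB : (pvP l).filter
        (fun v => decide (v ∉ (pvP l).take nb.toNat ∨ counts.getD v 0 > 1)) = P2 := by
    rw [hP2def]
    apply List.filter_congr
    intro v hv
    rw [decide_eq_decide, hgetD v]
    have h1 := hc1 v hv
    simp only [hcnt1def]
    by_cases hm : v ∈ (pvP l).take nb.toNat
    · simp only [if_pos hm]
      constructor
      · intro h
        rcases h with h | h
        · exact absurd hm h
        · omega
      · intro h
        right
        omega
    · simp only [if_neg hm]
      constructor
      · intro _
        omega
      · intro _
        exact Or.inl hm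
  rw [hfiltB]
  have e1 : ((pvP l).take nb.toNat).length + (pvG cnt1 (pvP l)).length
      = (pvG (pvCnt l) (pvP l)).length := by
    have h := pvLoop2_len nb (pvG (pvCnt l) (pvP l)) [] [] 0
    rw [hmain1] at h
    simpa using h
  have e2 : (P2.take nb.toNat).length + (pvG cnt2 P2).length = (pvG cnt1 P2).length := by
    have h := pvLoop2_len nb (pvG cnt1 P2) [] [] 0
    rw [hmain2] at h
    simpa using h
  have eG : (pvG cnt1 (pvP l)).length = (pvG cnt1 P2).length := by
    rw [pvG_filter cnt1 (pvP l), ← hP2def]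
  have hfn : (fun v => List.count v s) = pvCnt l := by
    funext v
    simp only [pvCnt, hS]
  have hperm : (PySem.Set.ofList s).Perm (pvP l) := by
    have h := PySem.List.sorted_perm (PySem.Set.ofList (pvS l)) (fun v => -(pvCnt l v : Int)) false
    rw [hS] at h
    exact h.symm
  have hslen : s.length = (pvG (pvCnt l) (pvP l)).length := by
    have hgr := pvGrouped (PySem.Set.ofList s) s (pvOfList_pairwise_lt s hs) hs
      (fun x => PySem.Set.mem_ofList s x)
    have h2 : s.length = (pvG (fun v => List.count v s) (PySem.Set.ofList s)).length := by
      conv_lhs => rw [hgr]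
      rfl
    rw [h2, hfn]
    exact pvG_len_perm (pvCnt l) _ _ hperm
  rw [Prod.mk.injEq]
  refine ⟨rfl, ?_⟩
  rw [decide_eq_decide]
  omega

-- ===== VERDICT (by name: the statement is the Claim_ definition above) =====
theorem agenceObjetVitrines_spec : Claim_equal_agenceObjetVitrines := by
  intro nbEmplacement lObjets _
  unfold Spec_agenceObjetVitrines
  exact pvMainEq nbEmplacement lObjets
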